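-- pv_equiv track=rewrite | github.com/mfeng38/Scantron-Marker | Scantron Marker.py | distributionPoints
-- ===== SOURCE A (Python) =====
-- def distributionPoints(p_stud_avrg,p_graderanges):
--     distptlist = [0,0,0,0,0,0,0,0,0,0]
--     for i in range(len(p_stud_avrg)):
--         j = 0
--         while p_stud_avrg[i] > graderanges[j]:
--             j += 1
--         distptlist[j] += 1
--     return distptlist
--
-- graderanges = [10,20,30,40,50,60,70,80,90,100]
-- ===== SOURCE B (Python) =====
-- def distributionPoints(p_stud_avrg, p_graderanges):
--     distptlist = [0] * 10
--     for v in p_stud_avrg: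
--         j = (v + 9) // 10 - 1
--         if j < 0:
--             j = 0
--         distptlist[j] += 1
--     return distptlist
-- ===== Notes on version B (the rewrite author's own statement) =====
-- stated objective: simpler
-- what changed: Replaces the inner while-scan over the hard-coded graderanges list with a direct bucket-index computation j = max(0, ceil(v/10)-1) via integer arithmetic.
import Mathlib
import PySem

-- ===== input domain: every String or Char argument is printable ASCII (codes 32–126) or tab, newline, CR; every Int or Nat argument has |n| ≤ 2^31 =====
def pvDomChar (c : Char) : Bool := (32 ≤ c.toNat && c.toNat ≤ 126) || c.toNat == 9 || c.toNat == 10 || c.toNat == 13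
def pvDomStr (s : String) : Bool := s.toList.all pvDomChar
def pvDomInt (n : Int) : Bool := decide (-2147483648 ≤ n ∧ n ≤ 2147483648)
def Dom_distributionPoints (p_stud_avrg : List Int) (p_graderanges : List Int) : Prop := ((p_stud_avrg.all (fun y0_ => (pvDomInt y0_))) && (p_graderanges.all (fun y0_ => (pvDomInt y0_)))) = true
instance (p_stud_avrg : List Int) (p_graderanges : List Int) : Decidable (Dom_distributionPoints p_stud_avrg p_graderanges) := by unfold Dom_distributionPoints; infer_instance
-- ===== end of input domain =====

-- B replaces A's inner while-scan over the hard-coded graderanges list by a direct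
-- arithmetic bucket index j = max(0, ceil(v/10)-1); objective: simpler.

-- ===== PORT A =====
-- the module-level constant `graderanges` that A actually reads (it ignores p_graderanges)
def pvGraderanges : List Int := [10, 20, 30, 40, 50, 60, 70, 80, 90, 100]

-- the inner `while p_stud_avrg[i] > graderanges[j]: j += 1` loop, walking graderanges from index j;
-- an empty remainder corresponds to graderanges[j] raising IndexError (excluded by Pre_)
def pvWhileJ (v : Int) : List Int → Nat → Nat
  | [], j => j
  | g :: gs, j => if v > g then pvWhileJ v gs (j + 1) else j

def distributionPoints (p_stud_avrg : List Int) (p_graderanges : List Int) : List Int :=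
  p_stud_avrg.foldl
    (fun distptlist v => distptlist.modify (pvWhileJ v pvGraderanges 0) (· + 1))
    [0, 0, 0, 0, 0, 0, 0, 0, 0, 0]

-- ===== PORT B =====
-- j = (v + 9) // 10 - 1, clamped below at 0
def pvBucket (v : Int) : Int :=
  let j := PySem.Int.floordiv (v + 9) 10 - 1
  if j < 0 then 0 else j

def distributionPoints_alt (p_stud_avrg : List Int) (p_graderanges : List Int) : List Int :=
  p_stud_avrg.foldl
    (fun distptlist v => distptlist.modify (pvBucket v).toNat (· + 1))
    [0, 0, 0, 0, 0, 0, 0, 0, 0, 0]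

-- ===== PRECONDITION & SPEC =====
-- Pre_ excludes averages above 100: there A's while loop runs past the end of graderanges
-- and raises IndexError (B raises IndexError on the same inputs).
def Pre_distributionPoints (p_stud_avrg : List Int) (p_graderanges : List Int) : Prop :=
  ∀ v ∈ p_stud_avrg, v ≤ 100

instance (p_stud_avrg : List Int) (p_graderanges : List Int) : Decidable (Pre_distributionPoints p_stud_avrg p_graderanges) := by unfold Pre_distributionPoints; infer_instance

def pvWitness_distributionPoints : List Int × List Int := ([5, 10, 11, 100, 0, -3], [])

def Spec_distributionPoints (p_stud_avrg : List Int) (p_graderanges : List Int) (out : List Int) : Prop := out = distributionPoints_alt p_stud_avrg p_graderanges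
instance (p_stud_avrg : List Int) (p_graderanges : List Int) (out : List Int) : Decidable (Spec_distributionPoints p_stud_avrg p_graderanges out) := by unfold Spec_distributionPoints; infer_instance

-- ===== CLAIM (what is proved, stated in full; the proofs are below) =====
def Claim_equal_distributionPoints : Prop := ∀ (p_stud_avrg : List Int) (p_graderanges : List Int), Dom_distributionPoints p_stud_avrg p_graderanges → Pre_distributionPoints p_stud_avrg p_graderanges → Spec_distributionPoints p_stud_avrg p_graderanges (distributionPoints p_stud_avrg p_graderanges)

-- ===== LEMMAS AND PROOFS =====

theorem pvBucket_eq_whileJ (v : Int) (hv : v ≤ 100) :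
    pvWhileJ v pvGraderanges 0 = (pvBucket v).toNat := by
  have hfd : PySem.Int.floordiv (v + 9) 10 = (v + 9) / 10 :=
    PySem.Int.floordiv_eq_ediv_of_pos (by omega)
  simp only [pvWhileJ, pvGraderanges, pvBucket, hfd]
  split_ifs <;> omega

theorem distributionPoints_spec_aux (l : List Int) (acc : List Int)
    (h : ∀ v ∈ l, v ≤ 100) :
    l.foldl (fun distptlist v => distptlist.modify (pvWhileJ v pvGraderanges 0) (· + 1)) acc
      = l.foldl (fun distptlist v => distptlist.modify (pvBucket v).toNat (· + 1)) acc := by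
  induction l generalizing acc with
  | nil => rfl
  | cons x xs ih =>
    simp only [List.foldl_cons]
    rw [pvBucket_eq_whileJ x (h x (List.mem_cons_self))]
    exact ih _ (fun v hv => h v (List.mem_cons_of_mem _ hv))

-- ===== VERDICT (by name: the statement is the Claim_ definition above) =====
theorem distributionPoints_spec : Claim_equal_distributionPoints := by
  intro p_stud_avrg p_graderanges _ hpre
  unfold Spec_distributionPoints distributionPoints distributionPoints_alt
  exact distributionPoints_spec_aux _ _ hpre
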